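-- pv_equiv track=rewrite | github.com/wazuh/wazuh-dashboard-plugins | docker/splunk-dashboard/splunk-etc/apps/search/bin/scrub.py | looksLikeWord
-- ===== SOURCE A (Python) =====
-- def looksLikeWord(token):
--     upper = lower = 0
--     for c in token:
--         if not c.isalpha():
--             return False
--         if c.isupper():
--             upper += 1
--         else:
--             lower += 1
--     return len(token) > 2 and (upper == 0 or lower == 0 or upper == 1)
-- ===== SOURCE B (Python) =====
-- ASCII_LOWERS = "abcdefghijklmnopqrstuvwxyz"
--
-- def looksLikeWord(token):
--     if len(token) <= 2 or not token.isalpha():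
--         return False
--     if token.islower() or token.isupper():
--         return True
--     # mixed case: a word iff exactly one uppercase letter, i.e. everything
--     # after the first uppercase letter is lowercase
--     rest = token.lstrip(ASCII_LOWERS)
--     return rest[1:] == rest[1:].lower()
-- ===== Notes on version B (the rewrite author's own statement) =====
-- stated objective: idiomatic
-- what changed: Replaces A's fused per-character count-and-validate loop with Python string predicates: accept token.islower()/token.isupper() words outright, otherwise lstrip the leading lowercase run and require everything after its first (uppercase) letter to be lowercase, so no case counting is ever done.
import Mathlib
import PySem

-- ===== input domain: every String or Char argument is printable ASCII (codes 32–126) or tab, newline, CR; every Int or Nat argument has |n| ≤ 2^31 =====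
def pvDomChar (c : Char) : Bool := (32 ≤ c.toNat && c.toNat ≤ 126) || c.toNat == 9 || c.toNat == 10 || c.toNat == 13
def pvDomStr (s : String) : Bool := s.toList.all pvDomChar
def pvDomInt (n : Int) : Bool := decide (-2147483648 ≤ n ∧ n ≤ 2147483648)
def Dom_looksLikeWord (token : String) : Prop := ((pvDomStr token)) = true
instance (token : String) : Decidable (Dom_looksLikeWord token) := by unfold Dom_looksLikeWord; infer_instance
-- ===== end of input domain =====

-- B replaces A's fused per-character counting loop by Python string predicates: accept all-lowercase
-- or all-uppercase words outright, otherwise strip the leading lowercase run and demand everything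
-- after its first (uppercase) letter be lowercase; a timing run measured B faster (constant factor).

-- ===== PORT A =====
-- the fused loop of A: early-return None on a non-alpha char, otherwise count upper/lower
def lwLoopA : List Char → Int → Int → Option (Int × Int)
  | [], u, l => some (u, l)
  | c :: cs, u, l =>
    if ¬ PySem.Chars.isalpha c then none
    else if PySem.Chars.isupper c then lwLoopA cs (u + 1) l
    else lwLoopA cs u (l + 1)

def looksLikeWord (token : String) : Bool :=
  match lwLoopA token.toList 0 0 with
  | none => false
  | some (u, l) => decide (PySem.Str.len token > 2 ∧ (u = 0 ∨ l = 0 ∨ u = 1))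

-- ===== PORT B =====
-- ASCII_LOWERS = "abcdefghijklmnopqrstuvwxyz"
def lwLowers : List Char := ['a','b','c','d','e','f','g','h','i','j','k','l','m','n','o','p','q','r','s','t','u','v','w','x','y','z']

-- token.islower() / token.isupper(), ported by hand (exact on the ASCII domain, where the cased
-- characters are exactly a-z and A-Z): at least one cased char and no char of the other case
def lwStrIslower (cs : List Char) : Bool := cs.any PySem.Chars.islower && cs.all (fun c => !PySem.Chars.isupper c)
def lwStrIsupper (cs : List Char) : Bool := cs.any PySem.Chars.isupper && cs.all (fun c => !PySem.Chars.islower c)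

def looksLikeWord_alt (token : String) : Bool :=
  if PySem.Str.len token ≤ 2 || !PySem.Str.strIsalpha token then false
  else if lwStrIslower token.toList || lwStrIsupper token.toList then true
  else
    -- rest = token.lstrip(ASCII_LOWERS); return rest[1:] == rest[1:].lower()
    let rest := token.toList.dropWhile (fun c => lwLowers.contains c)
    PySem.List.slice rest (some 1) none == PySem.Chars.lower (PySem.List.slice rest (some 1) none)

-- ===== PRECONDITION & SPEC =====
def Spec_looksLikeWord (token : String) (out : Bool) : Prop := out = looksLikeWord_alt token
instance (token : String) (out : Bool) : Decidable (Spec_looksLikeWord token out) := by unfold Spec_looksLikeWord; infer_instance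

-- ===== CLAIM (what is proved, stated in full; the proofs are below) =====
def Claim_equal_looksLikeWord : Prop := ∀ (token : String), Dom_looksLikeWord token → Spec_looksLikeWord token (looksLikeWord token)

-- ===== LEMMAS AND PROOFS =====

theorem lwCharLe (d c : Char) : (d ≤ c) ↔ (d.toNat ≤ c.toNat) := by
  rw [Char.le_def, UInt32.le_iff_toNat_le]; rfl

theorem lwCharEq (c d : Char) : (c = d) ↔ (c.toNat = d.toNat) := by
  constructor
  · intro h; rw [h]
  · intro h; exact Char.ext (UInt32.toNat_inj.mp h)

-- on an alphabetic char, lowercase is exactly "not uppercase"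
theorem lwLowerNotUpper (c : Char) (h : PySem.Chars.isalpha c = true) :
    PySem.Chars.islower c = !PySem.Chars.isupper c := by
  simp only [PySem.Chars.isalpha, PySem.Chars.islower, PySem.Chars.isupper, Bool.or_eq_true,
    Bool.and_eq_true, decide_eq_true_eq, lwCharLe] at h
  cases hl : PySem.Chars.islower c <;> cases hu : PySem.Chars.isupper c <;>
    simp_all only [PySem.Chars.islower, PySem.Chars.isupper, Bool.and_eq_true, Bool.and_eq_false_iff,
      decide_eq_true_eq, decide_eq_false_iff_not, lwCharLe, Bool.not_true, Bool.not_false, not_le] <;>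
    simp_all <;> omega

theorem lwMemLowers (c : Char) : lwLowers.contains c = PySem.Chars.islower c := by
  cases hl : PySem.Chars.islower c <;>
  · simp_all only [lwLowers, List.contains_cons, List.contains_nil, PySem.Chars.islower,
      Bool.or_eq_true, Bool.or_eq_false_iff, beq_iff_eq, beq_eq_false_iff_ne, ne_eq,
      Bool.and_eq_true, Bool.and_eq_false_iff, decide_eq_true_eq, decide_eq_false_iff_not,
      not_le, lwCharLe, lwCharEq]
    simp_all
    omega

theorem lwLowerCharUpper (c : Char) (h : PySem.Chars.isupper c = true) :
    PySem.Chars.lowerChar c ≠ c := by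
  simp only [PySem.Chars.lowerChar, h, if_true]
  simp only [PySem.Chars.isupper, Bool.and_eq_true, decide_eq_true_eq, lwCharLe] at h
  have hA : ('A'.toNat = 65) := rfl
  have hZ : ('Z'.toNat = 90) := rfl
  have hv : (c.toNat + 32).isValidChar := Or.inl (by omega)
  intro he
  have h2 := congrArg Char.toNat he
  rw [Char.toNat_ofNat, if_pos hv] at h2
  omega

theorem lwLowerCharFix (c : Char) (h : PySem.Chars.isupper c = false) :
    PySem.Chars.lowerChar c = c := by
  simp [PySem.Chars.lowerChar, h]

def lwUpperSum (cs : List Char) : Int :=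
  (cs.map (fun c => if PySem.Chars.isupper c then (1 : Int) else 0)).sum

-- A's loop, characterized
theorem lwLoopA_eq (cs : List Char) : ∀ (u l : Int),
    lwLoopA cs u l =
      if cs.all PySem.Chars.isalpha then
        some (u + lwUpperSum cs, l + ((cs.length : Int) - lwUpperSum cs))
      else none := by
  induction cs with
  | nil => intro u l; simp [lwLoopA, lwUpperSum]
  | cons c cs ih =>
    intro u l
    by_cases ha : PySem.Chars.isalpha c
    · by_cases hu : PySem.Chars.isupper c
      · simp only [lwLoopA, ha, hu, if_true, not_true, ih]
        by_cases hall : cs.all PySem.Chars.isalpha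
        · simp [hall, ha, lwUpperSum, hu]
          omega
        · simp [hall, ha]
      · simp only [lwLoopA, ha, hu, if_false, not_true, ih]
        by_cases hall : cs.all PySem.Chars.isalpha
        · simp [hall, ha, lwUpperSum, hu]
          omega
        · simp [hall, ha]
    · simp [lwLoopA, ha]

theorem lwUpperSum_eq_countP (cs : List Char) :
    lwUpperSum cs = (cs.countP PySem.Chars.isupper : Int) := by
  induction cs with
  | nil => simp [lwUpperSum]
  | cons c cs ih =>
    by_cases h : PySem.Chars.isupper c <;> simp [lwUpperSum, h] at * <;>
      omega

-- on an all-alphabetic list, every char is upper or lower, so the two counts partition the length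
theorem lwCountPartition (cs : List Char) (hall : ∀ c ∈ cs, PySem.Chars.isalpha c = true) :
    cs.countP PySem.Chars.isupper + cs.countP PySem.Chars.islower = cs.length := by
  induction cs with
  | nil => simp
  | cons c cs ih =>
    have hc := lwLowerNotUpper c (hall c (by simp))
    have ih' := ih (fun c hc => hall c (by simp [hc]))
    rw [List.countP_cons, List.countP_cons, hc]
    by_cases h : PySem.Chars.isupper c <;> simp [h] <;> omega

-- lowering fixes a list of alphabetic chars iff it has no uppercase char
theorem lwLowerFix (t : List Char) :
    (PySem.Chars.lower t = t) ↔ t.countP PySem.Chars.isupper = 0 := by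
  induction t with
  | nil => simp [PySem.Chars.lower]
  | cons c t ih =>
    simp only [PySem.Chars.lower, List.map_cons, List.cons.injEq, List.countP_cons] at *
    constructor
    · rintro ⟨h1, h2⟩
      cases hu : PySem.Chars.isupper c
      · simpa [hu, ih.mp h2]
      · exact absurd h1 (lwLowerCharUpper c hu)
    · intro h
      have hu : PySem.Chars.isupper c = false := by
        cases hu : PySem.Chars.isupper c
        · rfl
        · rw [hu] at h; simp at h
      rw [hu] at h
      simp at h
      exact ⟨lwLowerCharFix c hu, ih.mpr (List.countP_eq_zero.mpr (by simpa using h))⟩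

-- stripping the leading lowercase run of a mixed-case alphabetic list exposes its first uppercase
theorem lwMixed (cs : List Char) (hall : ∀ c ∈ cs, PySem.Chars.isalpha c = true)
    (hu : cs.countP PySem.Chars.isupper ≠ 0) :
    ∃ r t, cs.dropWhile PySem.Chars.islower = r :: t ∧
      cs.countP PySem.Chars.isupper = 1 + t.countP PySem.Chars.isupper := by
  have hsplit := List.takeWhile_append_dropWhile (p := PySem.Chars.islower) (l := cs)
  have htake : (cs.takeWhile PySem.Chars.islower).countP PySem.Chars.isupper = 0 := by
    rw [List.countP_eq_zero]
    intro a ha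
    have hla := List.mem_takeWhile_imp ha
    have halpha : PySem.Chars.isalpha a = true := by
      apply hall; rw [← hsplit]; exact List.mem_append_left _ ha
    have := lwLowerNotUpper a halpha
    simp [hla] at this
    simp [this]
  cases hrest : cs.dropWhile PySem.Chars.islower with
  | nil =>
    exfalso
    apply hu
    have h1 : cs.countP PySem.Chars.isupper =
        (cs.takeWhile PySem.Chars.islower).countP PySem.Chars.isupper +
        (cs.dropWhile PySem.Chars.islower).countP PySem.Chars.isupper := by
      rw [← List.countP_append, hsplit]
    rw [h1, htake, hrest]
    simp
  | cons r t =>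
    have hrl : PySem.Chars.islower r = false := by
      have := List.head_dropWhile_not PySem.Chars.islower (l := cs) (by simp [hrest])
      simpa [hrest] using this
    have hrmem : r ∈ cs := by
      rw [← hsplit, hrest]; exact List.mem_append_right _ (by simp)
    have hru : PySem.Chars.isupper r = true := by
      have := lwLowerNotUpper r (hall r hrmem)
      rw [hrl] at this
      simpa using this.symm
    refine ⟨r, t, rfl, ?_⟩
    have h1 : cs.countP PySem.Chars.isupper =
        (cs.takeWhile PySem.Chars.islower).countP PySem.Chars.isupper +
        (cs.dropWhile PySem.Chars.islower).countP PySem.Chars.isupper := by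
      rw [← List.countP_append, hsplit]
    have h2 : (cs.dropWhile PySem.Chars.islower).countP PySem.Chars.isupper =
        t.countP PySem.Chars.isupper + 1 := by
      rw [hrest, List.countP_cons, hru]
      simp
    rw [h1, htake, h2]
    omega

-- drop the `[1:]` slice to a plain tail drop
theorem lwSliceOne (xs : List Char) : PySem.List.slice xs (some 1) none = xs.drop 1 := by
  cases xs <;> simp [PySem.List.slice]

-- ===== VERDICT (by name: the statement is the Claim_ definition above) =====
theorem looksLikeWord_spec : Claim_equal_looksLikeWord := by
  intro token _
  unfold Spec_looksLikeWord looksLikeWord looksLikeWord_alt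
  rw [lwLoopA_eq, lwUpperSum_eq_countP]
  have hLen : PySem.Str.len token = (token.toList.length : Int) := by
    simp [PySem.Str.len]
  by_cases hall : token.toList.all PySem.Chars.isalpha
  · have hall' : ∀ c ∈ token.toList, PySem.Chars.isalpha c = true := by
      simpa using hall
    by_cases hlen : token.toList.length ≤ 2
    · -- too short: both sides false
      have hlen2 : token.length ≤ 2 := by simpa using hlen
      have h1 : (PySem.Str.len token ≤ 2 || !PySem.Str.strIsalpha token) = true := by
        rw [hLen]
        simp
        exact Or.inl hlen2
      simp only [hall, if_true, h1]
      rw [decide_eq_false_iff_not]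
      rintro ⟨h2, -⟩
      rw [hLen] at h2
      omega
    · -- length > 2, all alphabetic (hence nonempty)
      have hne : token.toList ≠ [] := by intro h; rw [h] at hlen; simp at hlen
      have hsa : PySem.Str.strIsalpha token = true := by
        simp [PySem.Str.strIsalpha, PySem.Chars.strIsalpha, hne, hall]
      have hlen2 : 2 < token.length := by
        have := Nat.lt_of_not_le hlen
        simpa using this
      have h1 : (PySem.Str.len token ≤ 2 || !PySem.Str.strIsalpha token) = false := by
        rw [hLen, hsa]
        simp
        exact hlen2
      have hN : (2 : Int) < token.toList.length := by exact_mod_cast Nat.lt_of_not_le hlen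
      have hpart := lwCountPartition token.toList hall'
      simp only [hall, if_true, h1, Bool.false_eq_true, if_false, zero_add]
      by_cases hu0 : token.toList.countP PySem.Chars.isupper = 0
      · -- no uppercase: A's u = 0; B's islower() is true
        have hlow : lwStrIslower token.toList = true := by
          unfold lwStrIslower
          rw [List.countP_eq_zero] at hu0
          rcases List.exists_mem_of_ne_nil _ hne with ⟨c, hc⟩
          have hcu : PySem.Chars.isupper c = false := by
            have := hu0 c hc; simpa using this
          have hcl : PySem.Chars.islower c = true := by
            have := lwLowerNotUpper c (hall' c hc)
            rw [hcu] at this; simpa using this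
          refine Bool.and_eq_true _ _ |>.mpr ⟨List.any_eq_true.mpr ⟨c, hc, hcl⟩, ?_⟩
          simp only [List.all_eq_true]
          intro d hd
          have := hu0 d hd; simpa using this
        have h2 : (lwStrIslower token.toList || lwStrIsupper token.toList) = true := by
          simp [hlow]
        simp only [h2, if_true]
        exact decide_eq_true ⟨by rw [hLen]; exact hN, Or.inl (by exact_mod_cast hu0)⟩
      · by_cases hl0 : token.toList.countP PySem.Chars.islower = 0
        · -- no lowercase: A's l = 0; B's isupper() is true
          have hup : lwStrIsupper token.toList = true := by
            unfold lwStrIsupper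
            rw [List.countP_eq_zero] at hl0
            rcases List.exists_mem_of_ne_nil _ hne with ⟨c, hc⟩
            have hcl : PySem.Chars.islower c = false := by
              have := hl0 c hc; simpa using this
            have hcu : PySem.Chars.isupper c = true := by
              have := lwLowerNotUpper c (hall' c hc)
              rw [hcl] at this; simpa using this.symm
            refine Bool.and_eq_true _ _ |>.mpr ⟨List.any_eq_true.mpr ⟨c, hc, hcu⟩, ?_⟩
            simp only [List.all_eq_true]
            intro d hd
            have := hl0 d hd; simpa using this
          have h2 : (lwStrIslower token.toList || lwStrIsupper token.toList) = true := by
            simp [hup]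
          simp only [h2, if_true]
          exact decide_eq_true ⟨by rw [hLen]; exact hN, Or.inr (Or.inl (by omega))⟩
        · -- mixed case: both sides reduce to "exactly one uppercase"
          have hlow : lwStrIslower token.toList = false := by
            unfold lwStrIslower
            have hex : ∃ c ∈ token.toList, PySem.Chars.isupper c = true := by
              by_contra hno
              push_neg at hno
              exact hu0 (List.countP_eq_zero.mpr (by simpa using hno))
            rcases hex with ⟨c, hc, hcu⟩
            have : token.toList.all (fun c => !PySem.Chars.isupper c) = false := by
              rw [Bool.eq_false_iff]
              intro hA
              have := List.all_eq_true.mp hA c hc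
              simp [hcu] at this
            simp [this]
          have hup : lwStrIsupper token.toList = false := by
            unfold lwStrIsupper
            have hex : ∃ c ∈ token.toList, PySem.Chars.islower c = true := by
              by_contra hno
              push_neg at hno
              exact hl0 (List.countP_eq_zero.mpr (by simpa using hno))
            rcases hex with ⟨c, hc, hcl⟩
            have : token.toList.all (fun c => !PySem.Chars.islower c) = false := by
              rw [Bool.eq_false_iff]
              intro hA
              have := List.all_eq_true.mp hA c hc
              simp [hcl] at this
            simp [this]
          rcases lwMixed token.toList hall' hu0 with ⟨r, t, hdrop, hcount⟩
          have hdropB : token.toList.dropWhile (fun c => lwLowers.contains c) = r :: t := by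
            have hfe : (fun c => lwLowers.contains c) = PySem.Chars.islower :=
              funext lwMemLowers
            rw [hfe]; exact hdrop
          rw [hlow, hup]
          simp only [Bool.or_self, Bool.false_eq_true, if_false, hdropB, lwSliceOne,
            List.drop_succ_cons, List.drop_zero]
          -- B's final test equals "no uppercase in t"
          have hB : (t == PySem.Chars.lower t) = decide (t.countP PySem.Chars.isupper = 0) := by
            cases ht : decide (t.countP PySem.Chars.isupper = 0)
            · simp only [decide_eq_false_iff_not] at ht
              have hne2 : PySem.Chars.lower t ≠ t := fun h => ht ((lwLowerFix t).mp h)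
              exact beq_eq_false_iff_ne.mpr (fun h => hne2 h.symm)
            · simp only [decide_eq_true_eq] at ht
              exact beq_iff_eq.mpr ((lwLowerFix t).mpr ht).symm
          rw [hB, decide_eq_decide]
          rw [hLen]
          constructor
          · rintro ⟨-, h2 | h2 | h2⟩ <;> omega
          · intro h2
            exact ⟨by omega, Or.inr (Or.inr (by omega))⟩
  · -- a non-alphabetic char: A returns False; B's isalpha() check fails (or the string is empty)
    have hsa : PySem.Chars.strIsalpha token.toList = false := by
      simp [PySem.Chars.strIsalpha, eq_false_of_ne_true hall]
    simp [hall, PySem.Str.strIsalpha, hsa]
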